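-- pv_equiv track=rewrite | github.com/IanFinlayson/advent-of-code | 2024/14/soln.py | stepbot
-- ===== SOURCE A (Python) =====
-- def stepbot(col, row, dcol, drow, rows, cols):
--     c = col + dcol
--     while c >= cols:
--         c -= cols
--     while c < 0:
--         c += cols
--
--     r = row + drow
--     while r >= rows:
--         r -= rows
--     while r < 0:
--         r += rows
--     return c, r
-- ===== SOURCE B (Python) =====
-- def stepbot(col, row, dcol, drow, rows, cols):
--     return (col + dcol) % cols, (row + drow) % rows
-- ===== Notes on version B (the rewrite author's own statement) =====
-- stated objective: idiomatic
-- what changed: Replaces the two pairs of normalization while-loops with Python's modulo closed form (c+dc) % cols, (r+dr) % rows.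
import Mathlib
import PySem

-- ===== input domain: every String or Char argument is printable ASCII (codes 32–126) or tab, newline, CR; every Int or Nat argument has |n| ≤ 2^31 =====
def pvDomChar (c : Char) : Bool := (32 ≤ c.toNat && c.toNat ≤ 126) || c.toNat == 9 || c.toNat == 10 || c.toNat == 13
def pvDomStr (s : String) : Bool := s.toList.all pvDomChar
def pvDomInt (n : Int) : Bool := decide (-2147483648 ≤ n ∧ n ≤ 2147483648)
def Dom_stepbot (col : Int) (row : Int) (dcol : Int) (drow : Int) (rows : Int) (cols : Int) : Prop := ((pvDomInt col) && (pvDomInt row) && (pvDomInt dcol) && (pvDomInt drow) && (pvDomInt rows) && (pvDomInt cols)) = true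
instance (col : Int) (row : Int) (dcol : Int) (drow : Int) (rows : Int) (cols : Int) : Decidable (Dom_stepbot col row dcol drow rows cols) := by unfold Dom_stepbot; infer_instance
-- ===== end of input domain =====

-- B replaces A's two pairs of normalization while-loops with the modulo closed form; objective: idiomatic.


-- ===== PORT A =====
-- `while c >= m: c -= m`; the `0 < m` conjunct is a pure totality guard (the Python
-- loop diverges when m ≤ 0, and such inputs are excluded by Pre_stepbot).
def stepbotSubLoop (c m : Int) : Int :=
  if _h : c ≥ m ∧ 0 < m then stepbotSubLoop (c - m) m else c
  termination_by c.toNat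
  decreasing_by omega

-- `while c < 0: c += m`; same totality guard.
def stepbotAddLoop (c m : Int) : Int :=
  if _h : c < 0 ∧ 0 < m then stepbotAddLoop (c + m) m else c
  termination_by (-c).toNat
  decreasing_by omega

def stepbot (col : Int) (row : Int) (dcol : Int) (drow : Int) (rows : Int) (cols : Int) : Int × Int :=
  let c := stepbotAddLoop (stepbotSubLoop (col + dcol) cols) cols
  let r := stepbotAddLoop (stepbotSubLoop (row + drow) rows) rows
  (c, r)

-- ===== PORT B =====
def stepbot_alt (col : Int) (row : Int) (dcol : Int) (drow : Int) (rows : Int) (cols : Int) : Int × Int :=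
  (PySem.Int.mod (col + dcol) cols, PySem.Int.mod (row + drow) rows)

-- ===== PRECONDITION & SPEC =====
-- Pre_ excludes rows ≤ 0 or cols ≤ 0: there Python A never returns (its while loops run forever).
def Pre_stepbot (_col : Int) (_row : Int) (_dcol : Int) (_drow : Int) (rows : Int) (cols : Int) : Prop :=
  0 < rows ∧ 0 < cols
instance (col : Int) (row : Int) (dcol : Int) (drow : Int) (rows : Int) (cols : Int) : Decidable (Pre_stepbot col row dcol drow rows cols) := by unfold Pre_stepbot; infer_instance
def pvWitness_stepbot : Int × Int × Int × Int × Int × Int := (3, 5, -7, 11, 7, 11)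

def Spec_stepbot (col : Int) (row : Int) (dcol : Int) (drow : Int) (rows : Int) (cols : Int) (out : Int × Int) : Prop := out = stepbot_alt col row dcol drow rows cols
instance (col : Int) (row : Int) (dcol : Int) (drow : Int) (rows : Int) (cols : Int) (out : Int × Int) : Decidable (Spec_stepbot col row dcol drow rows cols out) := by unfold Spec_stepbot; infer_instance

-- ===== CLAIM (what is proved, stated in full; the proofs are below) =====
def Claim_equal_stepbot : Prop := ∀ (col : Int) (row : Int) (dcol : Int) (drow : Int) (rows : Int) (cols : Int), Dom_stepbot col row dcol drow rows cols → Pre_stepbot col row dcol drow rows cols → Spec_stepbot col row dcol drow rows cols (stepbot col row dcol drow rows cols)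

-- ===== LEMMAS AND PROOFS =====
theorem subLoop_lt (c m : Int) (hm : 0 < m) : stepbotSubLoop c m < m := by
  rw [stepbotSubLoop]
  split
  · exact subLoop_lt (c - m) m hm
  · omega
  termination_by c.toNat
  decreasing_by omega

theorem subLoop_emod (c m : Int) : stepbotSubLoop c m % m = c % m := by
  rw [stepbotSubLoop]
  split
  · rw [subLoop_emod (c - m) m]; simp [Int.sub_emod_right]
  · rfl
  termination_by c.toNat
  decreasing_by omega

theorem addLoop_eq (c m : Int) (hm : 0 < m) (hlt : c < m) : stepbotAddLoop c m = c % m := by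
  rw [stepbotAddLoop]
  split
  · rw [addLoop_eq (c + m) m hm (by omega)]; simp [Int.add_emod_right]
  · rw [Int.emod_eq_of_lt (by omega) hlt]
  termination_by (-c).toNat
  decreasing_by omega

theorem wrap_eq (c m : Int) (hm : 0 < m) :
    stepbotAddLoop (stepbotSubLoop c m) m = c % m := by
  rw [addLoop_eq _ _ hm (subLoop_lt c m hm), subLoop_emod]

-- ===== VERDICT (by name: the statement is the Claim_ definition above) =====
theorem stepbot_spec : Claim_equal_stepbot := by
  intro col row dcol drow rows cols _ hpre
  obtain ⟨hr, hc⟩ := hpre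
  unfold Spec_stepbot stepbot stepbot_alt
  rw [PySem.Int.mod_eq_emod_of_pos hc, PySem.Int.mod_eq_emod_of_pos hr]
  simp only [wrap_eq _ _ hc, wrap_eq _ _ hr]
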